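-- pv_equiv track=rewrite | github.com/PengGaoxian/periodical_delivery_path_planning | common_route.py | findMaxSpanElements
-- ===== SOURCE A (Python) =====
-- def findMaxSpanElements(logistics_route, commuting_route):
--     # 确定commuting_route中元素在logistics_route中的索引位置
--     indexes = []
--     for element in commuting_route:
--         if element in logistics_route:
--             indexes.append(logistics_route.index(element))
--         else:
--             indexes.append(None)
--
--     # 排除无效索引（即logistics_route中不存在的元素）
--     valid_indexes = [index for index in indexes if index is not None]
--
--     # 找到索引范围的最小值和最大值
--     if len(valid_indexes) == 0:
--         return []
--     else:
--         start_index = min(valid_indexes)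
--         end_index = max(valid_indexes)
--
--         # 提取logistics_route中对应索引范围的子集
--         result = logistics_route[start_index:end_index+1]
--         return result
-- ===== SOURCE B (Python) =====
-- def findMaxSpanElements(logistics_route, commuting_route):
--     seen = []
--     start = None
--     end = None
--     for i, e in enumerate(logistics_route):
--         if e in seen:
--             continue
--         seen.append(e)
--         if e in commuting_route:
--             if start is None:
--                 start = i
--             end = i
--     if start is None:
--         return []
--     return logistics_route[start:end + 1]
-- ===== Notes on version B (the rewrite author's own statement) =====
-- stated objective: alternative
-- what changed: Instead of scanning commuting_route, collecting a list of first-occurrence indices and then taking min/max, B makes one pass over logistics_route with enumerate, gating on a seen list and maintaining running start/end accumulators for the span.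
import Mathlib
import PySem

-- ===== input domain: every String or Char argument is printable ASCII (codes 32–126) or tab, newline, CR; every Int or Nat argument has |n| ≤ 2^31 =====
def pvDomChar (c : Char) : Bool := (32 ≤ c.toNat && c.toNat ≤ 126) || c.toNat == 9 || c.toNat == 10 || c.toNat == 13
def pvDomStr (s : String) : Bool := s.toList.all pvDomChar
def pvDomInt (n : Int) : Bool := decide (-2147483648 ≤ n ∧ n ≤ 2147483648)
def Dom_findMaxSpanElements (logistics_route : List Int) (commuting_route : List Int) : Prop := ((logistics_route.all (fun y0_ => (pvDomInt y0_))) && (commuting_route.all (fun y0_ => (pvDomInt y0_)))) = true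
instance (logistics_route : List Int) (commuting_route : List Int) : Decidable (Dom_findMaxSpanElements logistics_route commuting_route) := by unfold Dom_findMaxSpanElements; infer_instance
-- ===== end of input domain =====

-- B replaces A's build-index-list-then-min/max pass over commuting_route by a single
-- enumerate pass over logistics_route with running start/end accumulators (objective: alternative).


-- ===== PORT A =====
-- A: build `indexes` (first index of each commuting element in logistics, or none),
-- filter the valid ones, then slice logistics from min to max.
def findMaxSpanElements (logistics_route : List Int) (commuting_route : List Int) : List Int :=
  let indexes : List (Option Nat) :=
    commuting_route.foldl
      (fun acc element =>
        if element ∈ logistics_route then acc ++ [PySem.List.index? logistics_route element]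
        else acc ++ [none]) []
  let valid_indexes : List Nat := indexes.filterMap id
  if valid_indexes.length = 0 then []
  else
    match PySem.List.min? valid_indexes (fun x => x), PySem.List.max? valid_indexes (fun x => x) with
    | some start_index, some end_index =>
        PySem.List.slice logistics_route (some (start_index : Int)) (some ((end_index : Int) + 1))
    | _, _ => []

-- ===== PORT B =====
-- B's loop: for i, e in enumerate(logistics): skip if e in seen, else append to seen and
-- if e in commuting update start (first time) and end (every time).
def pvBLoop (commuting_route : List Int) :
    List Int → Nat → List Int → Option Nat → Option Nat → Option Nat × Option Nat
  | [], _, _, start, fin => (start, fin)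
  | e :: rest, i, seen, start, fin =>
    if e ∈ seen then pvBLoop commuting_route rest (i + 1) seen start fin
    else
      let seen' := seen ++ [e]
      if e ∈ commuting_route then
        pvBLoop commuting_route rest (i + 1) seen'
          (match start with | none => some i | some s => some s) (some i)
      else pvBLoop commuting_route rest (i + 1) seen' start fin

def findMaxSpanElements_alt (logistics_route : List Int) (commuting_route : List Int) : List Int :=
  let st := pvBLoop commuting_route logistics_route 0 [] none none
  match st.1 with
  | none => []          -- start is None: no commuting element occurs
  | some start =>
    match st.2 with
    | none => []        -- not reachable: end is set whenever start is
    | some fin => PySem.List.slice logistics_route (some (start : Int)) (some ((fin : Int) + 1))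

-- ===== PRECONDITION & SPEC =====
def Spec_findMaxSpanElements (logistics_route : List Int) (commuting_route : List Int) (out : List Int) : Prop := out = findMaxSpanElements_alt logistics_route commuting_route
instance (logistics_route : List Int) (commuting_route : List Int) (out : List Int) : Decidable (Spec_findMaxSpanElements logistics_route commuting_route out) := by unfold Spec_findMaxSpanElements; infer_instance

-- ===== CLAIM (what is proved, stated in full; the proofs are below) =====
def Claim_equal_findMaxSpanElements : Prop := ∀ (logistics_route : List Int) (commuting_route : List Int), Dom_findMaxSpanElements logistics_route commuting_route → Spec_findMaxSpanElements logistics_route commuting_route (findMaxSpanElements logistics_route commuting_route)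

-- ===== LEMMAS AND PROOFS =====

-- Reference list of "first-occurrence indices of commuting elements" in scan order.
def pvR (c : List Int) : List Int → Nat → List Int → List Nat
  | [], _, _ => []
  | e :: rest, i, seen =>
    if e ∈ seen then pvR c rest (i + 1) seen
    else if e ∈ c then i :: pvR c rest (i + 1) (seen ++ [e])
    else pvR c rest (i + 1) (seen ++ [e])

-- B's loop returns (head?, getLast?) of pvR (with start/fin fallbacks).
theorem pvBLoop_eq (c : List Int) : ∀ (rest : List Int) (i : Nat) (seen : List Int)
    (start fin : Option Nat),
    pvBLoop c rest i seen start fin =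
      ((match start with | none => (pvR c rest i seen).head? | some s => some s),
       (match (pvR c rest i seen).getLast? with | none => fin | some x => some x)) := by
  intro rest
  induction rest with
  | nil => intro i seen start fin; rcases start <;> simp [pvBLoop, pvR]
  | cons e rest ih =>
    intro i seen start fin
    by_cases hs : e ∈ seen
    · simp [pvBLoop, pvR, hs, ih]
    · by_cases hc : e ∈ c
      · simp only [pvBLoop, pvR, hs, hc, if_pos, ite_false]
        rw [ih]
        rcases start with _ | s
        · rcases hR : pvR c rest (i + 1) (seen ++ [e]) with _ | ⟨a, t⟩ <;>
            simp [hR, List.getLast?_cons]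
        · rcases hR : pvR c rest (i + 1) (seen ++ [e]) with _ | ⟨a, t⟩ <;>
            simp [hR, List.getLast?_cons]
      · simp [pvBLoop, pvR, hs, hc, ih]

-- Membership in pvR.
theorem mem_pvR (c : List Int) : ∀ (rest : List Int) (i : Nat) (seen : List Int) (k : Nat),
    k ∈ pvR c rest i seen ↔
      ∃ e j, e ∈ c ∧ e ∉ seen ∧ PySem.List.index? rest e = some j ∧ k = i + j := by
  intro rest
  induction rest with
  | nil =>
    intro i seen k
    simp [pvR, PySem.List.index?]
  | cons e rest ih =>
    intro i seen k
    by_cases hs : e ∈ seen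
    · simp only [pvR, hs, if_pos]
      rw [ih]
      constructor
      · rintro ⟨e', j, he'c, he's, hidx, hk⟩
        refine ⟨e', j + 1, he'c, he's, ?_, by omega⟩
        have hne : e ≠ e' := by rintro rfl; exact he's hs
        rw [PySem.List.index?_cons_of_ne _ hne, hidx]; rfl
      · rintro ⟨e', j, he'c, he's, hidx, hk⟩
        have hne : e ≠ e' := by rintro rfl; exact he's hs
        rw [PySem.List.index?_cons_of_ne _ hne] at hidx
        rcases hj : PySem.List.index? rest e' with _ | j'
        · rw [hj] at hidx; simp at hidx
        · rw [hj] at hidx; simp at hidx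
          exact ⟨e', j', he'c, he's, hj, by omega⟩
    · by_cases hc : e ∈ c
      · simp only [pvR, hs, hc, ite_true, ite_false, List.mem_cons]
        rw [ih]
        constructor
        · rintro (rfl | ⟨e', j, he'c, he's, hidx, hk⟩)
          · exact ⟨e, 0, hc, hs, PySem.List.index?_cons_self _ _, by omega⟩
          · have hne : e ≠ e' := by
              rintro rfl; exact he's (by simp)
            refine ⟨e', j + 1, he'c, fun h => he's (by simp [h]) , ?_, by omega⟩
            · rw [PySem.List.index?_cons_of_ne _ hne, hidx]; rfl
        · rintro ⟨e', j, he'c, he's, hidx, hk⟩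
          by_cases hee : e = e'
          · subst hee
            rw [PySem.List.index?_cons_self] at hidx
            simp at hidx
            left; omega
          · rw [PySem.List.index?_cons_of_ne _ hee] at hidx
            rcases hj : PySem.List.index? rest e' with _ | j'
            · rw [hj] at hidx; simp at hidx
            · rw [hj] at hidx; simp at hidx
              right
              refine ⟨e', j', he'c, ?_, hj, by omega⟩
              simp only [List.mem_append, List.mem_singleton]
              rintro (h | h); exact he's h; exact hee h.symm
      · simp only [pvR, hs, hc, ite_false]
        rw [ih]
        constructor
        · rintro ⟨e', j, he'c, he's, hidx, hk⟩
          have hne : e ≠ e' := by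
            rintro rfl; exact he's (by simp)
          refine ⟨e', j + 1, he'c, fun h => he's (by simp [h]), ?_, by omega⟩
          rw [PySem.List.index?_cons_of_ne _ hne, hidx]; rfl
        · rintro ⟨e', j, he'c, he's, hidx, hk⟩
          have hne : e ≠ e' := by rintro rfl; exact hc he'c
          rw [PySem.List.index?_cons_of_ne _ hne] at hidx
          rcases hj : PySem.List.index? rest e' with _ | j'
          · rw [hj] at hidx; simp at hidx
          · rw [hj] at hidx; simp at hidx
            refine ⟨e', j', he'c, ?_, hj, by omega⟩
            simp only [List.mem_append, List.mem_singleton]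
            rintro (h | h); exact he's h; exact hne h.symm

-- Every element of pvR is ≥ i.
theorem pvR_ge (c : List Int) : ∀ (rest : List Int) (i : Nat) (seen : List Int) (k : Nat),
    k ∈ pvR c rest i seen → i ≤ k := by
  intro rest
  induction rest with
  | nil => intro i seen k h; simp [pvR] at h
  | cons e rest ih =>
    intro i seen k h
    by_cases hs : e ∈ seen
    · simp only [pvR, hs, ite_true] at h; exact Nat.le_of_succ_le (ih _ _ _ h)
    · by_cases hc : e ∈ c
      · simp only [pvR, hs, hc, ite_true, ite_false, List.mem_cons] at h
        rcases h with rfl | h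
        · exact le_refl _
        · exact Nat.le_of_succ_le (ih _ _ _ h)
      · simp only [pvR, hs, hc, ite_false] at h; exact Nat.le_of_succ_le (ih _ _ _ h)

theorem pvR_pairwise (c : List Int) : ∀ (rest : List Int) (i : Nat) (seen : List Int),
    (pvR c rest i seen).Pairwise (· < ·) := by
  intro rest
  induction rest with
  | nil => intro i seen; simp [pvR]
  | cons e rest ih =>
    intro i seen
    by_cases hs : e ∈ seen
    · simp only [pvR, hs, ite_true]; exact ih _ _
    · by_cases hc : e ∈ c
      · simp only [pvR, hs, hc, ite_true, ite_false]
        refine List.Pairwise.cons ?_ (ih _ _)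
        intro k hk
        have := pvR_ge c rest (i + 1) (seen ++ [e]) k hk
        omega
      · simp only [pvR, hs, hc, ite_false]; exact ih _ _

-- head of a <-pairwise list is a lower bound; last is an upper bound.
theorem pairwise_head_le {l : List Nat} (h : l.Pairwise (· < ·)) {a : Nat}
    (ha : l.head? = some a) : ∀ x ∈ l, a ≤ x := by
  cases l with
  | nil => simp at ha
  | cons b t =>
    simp at ha; subst ha
    intro x hx
    rcases List.mem_cons.mp hx with rfl | hx
    · exact le_refl _
    · exact le_of_lt ((List.pairwise_cons.mp h).1 x hx)

theorem pairwise_last_ge : ∀ (l : List Nat), l.Pairwise (· < ·) → ∀ (g : Nat),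
    l.getLast? = some g → ∀ x ∈ l, x ≤ g := by
  intro l
  induction l with
  | nil => intro _ g hg; simp at hg
  | cons b t ih =>
    intro h g hg x hx
    cases t with
    | nil =>
      simp at hg hx; omega
    | cons b' t' =>
      rw [List.getLast?_cons_cons] at hg
      rcases List.mem_cons.mp hx with rfl | hx
      · have hb : x < b' := (List.pairwise_cons.mp h).1 b' (by simp)
        have := ih (List.pairwise_cons.mp h).2 g hg b' (by simp)
        omega
      · exact ih (List.pairwise_cons.mp h).2 g hg x hx

-- A's indexes fold builds the map of index? over commuting_route.
theorem indexes_foldl (l : List Int) : ∀ (c : List Int) (acc : List (Option Nat)),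
    c.foldl
      (fun acc element =>
        if element ∈ l then acc ++ [PySem.List.index? l element]
        else acc ++ [none]) acc
      = acc ++ c.map (fun e => PySem.List.index? l e) := by
  intro c
  induction c with
  | nil => intro acc; simp
  | cons e c ih =>
    intro acc
    rw [List.foldl_cons]
    by_cases h : e ∈ l
    · rw [if_pos h, ih]; simp
    · rw [if_neg h, ih]
      have hn : PySem.List.index? l e = none := (PySem.List.index?_eq_none_iff l e).mpr h
      simp only [List.map_cons]
      rw [hn]
      simp

-- Membership in A's valid_indexes.
theorem mem_valid (l c : List Int) (k : Nat) :
    k ∈ (c.map (fun e => PySem.List.index? l e)).filterMap id ↔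
      ∃ e, e ∈ c ∧ PySem.List.index? l e = some k := by
  simp [List.mem_filterMap]

-- valid and pvR have the same members.
theorem mem_valid_iff_mem_pvR (l c : List Int) (k : Nat) :
    k ∈ (c.map (fun e => PySem.List.index? l e)).filterMap id ↔ k ∈ pvR c l 0 [] := by
  rw [mem_valid, mem_pvR]
  constructor
  · rintro ⟨e, he, h⟩; exact ⟨e, k, he, by simp, h, by omega⟩
  · rintro ⟨e, j, he, -, h, hk⟩
    subst hk
    exact ⟨e, he, by simpa using h⟩

-- ===== VERDICT (by name: the statement is the Claim_ definition above) =====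
theorem findMaxSpanElements_spec : Claim_equal_findMaxSpanElements := by
  intro l c _
  unfold Spec_findMaxSpanElements findMaxSpanElements findMaxSpanElements_alt
  rw [indexes_foldl l c []]
  simp only [List.nil_append]
  rw [pvBLoop_eq]
  set valid := (c.map (fun e => PySem.List.index? l e)).filterMap id with hvalid
  set R := pvR c l 0 [] with hR
  have hmem : ∀ k, k ∈ valid ↔ k ∈ R := fun k => mem_valid_iff_mem_pvR l c k
  by_cases hv : valid = []
  · have hRnil : R = [] := by
      cases hRc : R with
      | nil => rfl
      | cons a t =>
        exfalso
        have : a ∈ valid := (hmem a).mpr (by rw [hRc]; simp)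
        rw [hv] at this; simp at this
    simp [hv, hRnil]
  · have hlen : ¬ valid.length = 0 := by simpa [List.length_eq_zero_iff] using hv
    have hRne : R ≠ [] := by
      cases hRc : R with
      | nil =>
        exfalso
        cases hvc : valid with
        | nil => exact hv hvc
        | cons a t =>
          have : a ∈ R := (hmem a).mp (by rw [hvc]; simp)
          rw [hRc] at this; simp at this
      | cons a t => simp
    rcases hmin : PySem.List.min? valid (fun x => x) with _ | m
    · exact absurd ((PySem.List.min?_eq_none_iff _ _).mp hmin) hv
    rcases hmax : PySem.List.max? valid (fun x => x) with _ | M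
    · exact absurd ((PySem.List.max?_eq_none_iff _ _).mp hmax) hv
    rcases hh : R.head? with _ | h
    · exact absurd (List.head?_eq_none_iff.mp hh) hRne
    rcases hg : R.getLast? with _ | g
    · exact absurd (List.getLast?_eq_none_iff.mp hg) hRne
    have hpw := pvR_pairwise c l 0 []
    rw [← hR] at hpw
    -- m = h
    have hmmem : m ∈ valid := PySem.List.min?_mem hmin
    have hhmem : h ∈ R := List.mem_of_mem_head? (by simp [hh])
    have hm_le_h : m ≤ h := by
      have := PySem.List.min?_isMin hmin
      exact this h ((hmem h).mpr hhmem)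
    have hh_le_m : h ≤ m := pairwise_head_le hpw hh m ((hmem m).mp hmmem)
    have hmh : m = h := le_antisymm hm_le_h hh_le_m
    -- M = g
    have hMmem : M ∈ valid := PySem.List.max?_mem hmax
    have hgmem : g ∈ R := List.mem_of_getLast? hg
    have hg_le_M : g ≤ M := by
      have := PySem.List.max?_isMax hmax
      exact this g ((hmem g).mpr hgmem)
    have hM_le_g : M ≤ g := pairwise_last_ge R hpw g hg M ((hmem M).mp hMmem)
    have hMg : M = g := le_antisymm hM_le_g hg_le_M
    simp [hlen, hmh, hMg]
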